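-- pv_equiv track=rewrite | github.com/swhh/leetcode_problems | problem_84.py | subarrays_without_min_num
-- ===== SOURCE A (Python) =====
-- def subarrays_without_min_num(heights, min_num):
--     """Find indices of subarrays in heights that do not include min_num"""
--     n = len(heights)
--     min_places = (i for i in range(n) if heights[i] == min_num)
--     sub_arrays = []
--     start = 0
--     for i in min_places:
--         if i - start > 0:
--             sub_arrays.append((start, i))
--         start = i + 1
--     if start < n:
--         sub_arrays.append((start, n))
--     return sub_arrays
-- ===== SOURCE B (Python) =====
-- from itertools import groupby
--
--
-- def subarrays_without_min_num(heights, min_num):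
--     """Find indices of subarrays in heights that do not include min_num"""
--     sub_arrays = []
--     idx = 0
--     for is_min, grp in groupby(heights, key=lambda x: x == min_num):
--         length = sum(1 for _ in grp)
--         if not is_min:
--             sub_arrays.append((idx, idx + length))
--         idx += length
--     return sub_arrays
-- ===== Notes on version B (the rewrite author's own statement) =====
-- stated objective: idiomatic
-- what changed: Instead of iterating indices where heights[i] == min_num while carrying a 'start' register and a trailing flush, B groups heights into maximal runs with itertools.groupby keyed by (x == min_num) and emits one (idx, idx+len) range per non-min run, advancing a running index.
import Mathlib
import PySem

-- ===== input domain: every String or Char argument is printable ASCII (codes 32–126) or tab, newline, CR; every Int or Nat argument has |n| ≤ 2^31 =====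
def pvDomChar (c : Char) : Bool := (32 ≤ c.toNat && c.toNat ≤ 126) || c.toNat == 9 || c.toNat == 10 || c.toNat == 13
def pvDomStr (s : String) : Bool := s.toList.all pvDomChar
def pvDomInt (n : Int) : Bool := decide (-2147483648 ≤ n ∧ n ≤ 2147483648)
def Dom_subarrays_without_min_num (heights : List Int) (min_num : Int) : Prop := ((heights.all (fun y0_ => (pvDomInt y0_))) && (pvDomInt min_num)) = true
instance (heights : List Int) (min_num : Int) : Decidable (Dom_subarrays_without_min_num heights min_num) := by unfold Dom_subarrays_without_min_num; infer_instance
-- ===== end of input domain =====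

-- B replaces A's index-generator + start-register loop by a run-grouping pass (itertools.groupby
-- keyed by x == min_num), emitting one range per maximal non-min run; objective: idiomatic.


-- ===== PORT A =====
-- generator 'min_places' fused with the for-loop: fold over range(n), acting only when heights[i] == min_num
def subarrays_without_min_num (heights : List Int) (min_num : Int) : List (Int × Int) :=
  let n : Int := PySem.List.len heights
  let st :=
    (PySem.List.pyRange 0 n 1).foldl
      (fun (st : Int × List (Int × Int)) i =>
        match PySem.List.pyGet? heights i with
        | some h =>
          if h = min_num then
            (i + 1, if i - st.1 > 0 then st.2 ++ [(st.1, i)] else st.2)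
          else st
        | none => st)   -- unreachable: i ∈ range(len(heights))
      (0, [])
  if st.1 < n then st.2 ++ [(st.1, n)] else st.2

-- ===== PORT B =====
-- itertools.groupby: peel the maximal run sharing the head's key (x == min_num) each step
def subarraysAltGo (min_num : Int) (l : List Int) (idx : Int) : List (Int × Int) :=
  match l with
  | [] => []
  | x :: xs =>
    let run := xs.takeWhile (fun y => decide (y = min_num) == decide (x = min_num))
    let rest := xs.dropWhile (fun y => decide (y = min_num) == decide (x = min_num))
    let length : Int := 1 + run.length
    (if x = min_num then [] else [(idx, idx + length)]) ++ subarraysAltGo min_num rest (idx + length)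
termination_by l.length
decreasing_by
  have := List.length_dropWhile_le (p := fun y => decide (y = min_num) == decide (x = min_num)) (l := xs)
  simp only [List.length_cons]; omega

def subarrays_without_min_num_alt (heights : List Int) (min_num : Int) : List (Int × Int) :=
  subarraysAltGo min_num heights 0

-- ===== PRECONDITION & SPEC =====
def Spec_subarrays_without_min_num (heights : List Int) (min_num : Int) (out : List (Int × Int)) : Prop := out = subarrays_without_min_num_alt heights min_num
instance (heights : List Int) (min_num : Int) (out : List (Int × Int)) : Decidable (Spec_subarrays_without_min_num heights min_num out) := by unfold Spec_subarrays_without_min_num; infer_instance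

-- ===== CLAIM (what is proved, stated in full; the proofs are below) =====
def Claim_equal_subarrays_without_min_num : Prop := ∀ (heights : List Int) (min_num : Int), Dom_subarrays_without_min_num heights min_num → Spec_subarrays_without_min_num heights min_num (subarrays_without_min_num heights min_num)

-- ===== LEMMAS AND PROOFS =====

-- Reference recursion: remaining list, current run start, index of the head.
def specFn (min_num : Int) : List Int → Int → Int → List (Int × Int)
  | [], start, idx => if start < idx then [(start, idx)] else []
  | x :: xs, start, idx =>
    if x = min_num then
      if idx - start > 0 then (start, idx) :: specFn min_num xs (idx + 1) (idx + 1)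
      else specFn min_num xs (idx + 1) (idx + 1)
    else specFn min_num xs start (idx + 1)

-- A's loop step, on (index, element) pairs
def stepA (min_num : Int) (st : Int × List (Int × Int)) (p : Int × Int) : Int × List (Int × Int) :=
  if p.2 = min_num then
    (p.1 + 1, if p.1 - st.1 > 0 then st.2 ++ [(st.1, p.1)] else st.2)
  else st

theorem foldA_spec (min_num : Int) (l : List Int) :
    ∀ (idx start : Int) (acc : List (Int × Int)),
      (if ((PySem.List.enumerate l idx).foldl (stepA min_num) (start, acc)).1 < idx + l.length then
        ((PySem.List.enumerate l idx).foldl (stepA min_num) (start, acc)).2 ++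
          [(((PySem.List.enumerate l idx).foldl (stepA min_num) (start, acc)).1, idx + l.length)]
      else ((PySem.List.enumerate l idx).foldl (stepA min_num) (start, acc)).2)
      = acc ++ specFn min_num l start idx := by
  induction l with
  | nil =>
    intro idx start acc
    simp only [PySem.List.enumerate_nil, List.foldl_nil, List.length_nil, specFn]
    norm_num
    split_ifs <;> simp
  | cons x xs ih =>
    intro idx start acc
    rw [PySem.List.enumerate_cons, List.foldl_cons]
    simp only [List.length_cons, Nat.cast_add, Nat.cast_one]
    rw [show (idx + ((xs.length : Int) + 1)) = (idx + 1) + (xs.length : Int) by ring]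
    by_cases hx : x = min_num
    · by_cases hgt : idx - start > 0
      · have hstep : stepA min_num (start, acc) (idx, x) = (idx + 1, acc ++ [(start, idx)]) := by
          simp only [stepA]
          rw [if_pos hx, if_pos hgt]
        rw [hstep, ih (idx + 1) (idx + 1) (acc ++ [(start, idx)])]
        rw [specFn, if_pos hx, if_pos hgt]
        simp
      · have hstep : stepA min_num (start, acc) (idx, x) = (idx + 1, acc) := by
          simp only [stepA]
          rw [if_pos hx, if_neg hgt]
        rw [hstep, ih (idx + 1) (idx + 1) acc]
        rw [specFn, if_pos hx, if_neg hgt]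
    · have hstep : stepA min_num (start, acc) (idx, x) = (start, acc) := by
        simp only [stepA]
        rw [if_neg hx]
      rw [hstep, ih (idx + 1) start acc]
      rw [specFn]
      rw [if_neg hx]

theorem A_eq_specFn (heights : List Int) (min_num : Int) :
    subarrays_without_min_num heights min_num = specFn min_num heights 0 0 := by
  unfold subarrays_without_min_num
  simp only [PySem.List.len_eq]
  have hcongr :
      (PySem.List.pyRange 0 (heights.length : Int) 1).foldl
        (fun (st : Int × List (Int × Int)) i =>
          match PySem.List.pyGet? heights i with
          | some h =>
            if h = min_num then
              (i + 1, if i - st.1 > 0 then st.2 ++ [(st.1, i)] else st.2)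
            else st
          | none => st) (0, [])
      = (PySem.List.pyRange 0 (heights.length : Int) 1).foldl
          (fun st i => stepA min_num st (i, PySem.List.pyGetD heights i 0)) (0, []) := by
    refine PySem.List.foldl_congr_mem _ _ _ _ ?_
    intro acc x hx
    have hmem := (PySem.List.mem_pyRange_one).1 hx
    have hD : PySem.List.pyGetD heights x 0 = heights[x.toNat] := by
      simp [PySem.List.pyGetD_eq_getElem, hmem.1, hmem.2]
    simp only [PySem.List.pyGet?_eq_some_getElem heights hmem.1 (by simpa using hmem.2), stepA, hD]
  rw [hcongr]
  have hmap : (PySem.List.enumerate heights 0).foldl (stepA min_num) ((0 : Int), ([] : List (Int × Int)))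
      = (PySem.List.pyRange 0 (heights.length : Int) 1).foldl
          (fun st i => stepA min_num st (i, PySem.List.pyGetD heights i 0)) (0, []) := by
    rw [PySem.List.enumerate_eq_map_pyRange (d := 0), List.foldl_map]
    simp only [PySem.List.len_eq]
  rw [← hmap]
  have := foldA_spec min_num heights 0 0 []
  simpa using this

-- B: peeling one min_num element off the front advances idx by one
theorem altGo_cons_min (min_num : Int) (xs : List Int) (idx : Int) :
    subarraysAltGo min_num (min_num :: xs) idx = subarraysAltGo min_num xs (idx + 1) := by
  cases xs with
  | nil => simp [subarraysAltGo]
  | cons y ys =>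
    by_cases hy : y = min_num
    · subst hy
      rw [subarraysAltGo]
      conv_rhs => rw [subarraysAltGo]
      simp only [List.takeWhile, List.dropWhile, beq_self_eq_true,
        List.length_cons, if_true, List.nil_append]
      congr 1
      push_cast
      ring
    · rw [subarraysAltGo]
      have hfalse : (decide (y = min_num) == decide (min_num = min_num)) = false := by
        simp [hy]
      simp only [List.takeWhile_cons, List.dropWhile_cons]
      simp [hy]

-- canonical non-min run predicate
def notMinP (min_num : Int) : Int → Bool := fun y => decide (y = min_num) == false

-- fuel-indexed mutual induction: (main) B's groupby recursion equals specFn with start = idx;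
-- (run) inside a non-min run (start < idx) specFn emits the pending range at the run's end.
theorem go_and_run (min_num : Int) : ∀ (fuel : Nat),
    (∀ l : List Int, l.length ≤ fuel → ∀ idx,
      subarraysAltGo min_num l idx = specFn min_num l idx idx) ∧
    (∀ xs : List Int, xs.length ≤ fuel → ∀ start idx, start < idx →
      specFn min_num xs start idx =
        (start, idx + ((xs.takeWhile (notMinP min_num)).length : Int)) ::
          subarraysAltGo min_num (xs.dropWhile (notMinP min_num))
            (idx + ((xs.takeWhile (notMinP min_num)).length : Int))) := by
  intro fuel
  induction fuel with
  | zero =>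
    constructor
    · intro l hl idx
      have : l = [] := List.length_eq_zero_iff.mp (Nat.le_zero.mp hl)
      subst this
      simp [subarraysAltGo, specFn]
    · intro xs hxs start idx hlt
      have : xs = [] := List.length_eq_zero_iff.mp (Nat.le_zero.mp hxs)
      subst this
      simp [specFn, subarraysAltGo, hlt]
  | succ fuel ih =>
    constructor
    · -- main: B's recursion equals specFn with start = idx
      intro l hl idx
      cases l with
      | nil => simp [subarraysAltGo, specFn]
      | cons x xs =>
        have hxs : xs.length ≤ fuel := by simp only [List.length_cons] at hl; omega
        by_cases hx : x = min_num
        · subst hx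
          rw [altGo_cons_min, ih.1 xs hxs (idx + 1)]
          rw [specFn, if_pos rfl, if_neg (by omega)]
        · have hpred : (fun y => decide (y = min_num) == decide (x = min_num)) = notMinP min_num := by
            funext y
            rw [notMinP, decide_eq_false hx]
          rw [subarraysAltGo, specFn]
          simp only [if_neg hx, hpred]
          rw [ih.2 xs hxs idx (idx + 1) (by omega)]
          simp only [List.singleton_append]
          congr 2 <;> push_cast [List.length_cons] <;> ring
    · -- run: specFn inside a pending non-min run
      intro xs hxs start idx hlt
      cases xs with
      | nil => simp [specFn, subarraysAltGo, hlt]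
      | cons z zs =>
        have hzs : zs.length ≤ fuel := by simp only [List.length_cons] at hxs; omega
        by_cases hz : z = min_num
        · subst hz
          rw [specFn, if_pos rfl, if_pos (by omega)]
          have htk : (z :: zs).takeWhile (notMinP z) = ([] : List Int) := by
            rw [List.takeWhile_cons]
            simp [notMinP]
          have hdw : (z :: zs).dropWhile (notMinP z) = z :: zs := by
            rw [List.dropWhile_cons]
            simp [notMinP]
          rw [htk, hdw]
          simp only [List.length_nil, Nat.cast_zero, add_zero]
          rw [altGo_cons_min, ih.1 zs hzs (idx + 1)]
        · rw [specFn, if_neg hz]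
          rw [ih.2 zs hzs start (idx + 1) (by omega)]
          have htk : (z :: zs).takeWhile (notMinP min_num) = z :: zs.takeWhile (notMinP min_num) := by
            rw [List.takeWhile_cons, if_pos (by simp [notMinP, hz])]
          have hdw : (z :: zs).dropWhile (notMinP min_num) = zs.dropWhile (notMinP min_num) := by
            rw [List.dropWhile_cons, if_pos (by simp [notMinP, hz])]
          rw [htk, hdw]
          congr 2 <;> push_cast [List.length_cons] <;> ring

-- ===== VERDICT (by name: the statement is the Claim_ definition above) =====
theorem subarrays_without_min_num_spec : Claim_equal_subarrays_without_min_num := by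
  intro heights min_num _
  unfold Spec_subarrays_without_min_num subarrays_without_min_num_alt
  rw [A_eq_specFn, (go_and_run min_num heights.length).1 heights le_rfl 0]
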